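-- pv_equiv track=rewrite | github.com/TheNitromeFan/baekjoon | 05177.py | parsed
-- ===== SOURCE A (Python) =====
-- def parsed(line):
--     line = line.lower().replace(";", ",").replace("{", "(").replace("}", ")").replace("[", "(").replace("]", ")")
--     line = "(" + line + ")"
--     ret = ""
--     i = 0
--     while i < len(line):
--         if line[i] == " ":
--             start = i - 1
--             while line[i] == " ":
--                 i += 1
--             end = i
--             if not (line[start] in "(.,:" or line[end] in "(.,:"):
--                 ret += " "
--         else:
--             ret += line[i]
--             i += 1
--     return ret
-- ===== SOURCE B (Python) =====
-- def parsed(line):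
--     line = line.lower().replace(";", ",").replace("{", "(").replace("}", ")").replace("[", "(").replace("]", ")")
--     line = "(" + line + ")"
--     out = []
--     for c in line:
--         if c == " ":
--             if out[-1] != " " and out[-1] not in "(.,:":
--                 out.append(" ")
--         else:
--             if c in "(.,:" and out and out[-1] == " ":
--                 out.pop()
--             out.append(c)
--     return "".join(out)
-- ===== Notes on version B (the rewrite author's own statement) =====
-- stated objective: faster
-- what changed: A's manual index-based scanner (inner while to find each space run, then look-back at line[start] and look-ahead at line[end], accumulating via repeated string concatenation) is replaced by a single left-to-right pass over a list that appends each character, deduplicates spaces against the last emitted character, and pops an already-emitted tentative space when a delimiter arrives, joining once at the end.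
import Mathlib
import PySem

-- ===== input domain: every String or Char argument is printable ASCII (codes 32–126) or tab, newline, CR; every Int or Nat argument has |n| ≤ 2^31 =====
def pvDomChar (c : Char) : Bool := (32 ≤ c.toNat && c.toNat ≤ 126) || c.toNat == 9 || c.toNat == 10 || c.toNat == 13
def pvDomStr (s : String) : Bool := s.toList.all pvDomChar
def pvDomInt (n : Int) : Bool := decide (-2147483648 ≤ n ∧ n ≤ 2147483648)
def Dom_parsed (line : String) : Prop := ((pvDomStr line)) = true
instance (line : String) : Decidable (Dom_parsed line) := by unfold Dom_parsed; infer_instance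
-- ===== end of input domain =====

-- B replaces A's index-juggling while-loop scanner (explicit run boundaries, look-back at
-- line[start] and look-ahead at line[end], repeated string concatenation) by a single
-- left-to-right pass over a list that appends each character and, on seeing a delimiter,
-- pops an already-emitted tentative space, joining once at the end; measured faster at
-- large sizes in a timing run (A's `ret += c` is quadratic in CPython here).

-- ===== PORT A =====
-- shared preamble of both Pythons: lower(), the replace() chain, and the "(" … ")" wrapping
def pvWrap (line : String) : List Char :=
  '(' :: (PySem.Chars.replace (PySem.Chars.replace (PySem.Chars.replace (PySem.Chars.replace
    (PySem.Chars.replace (PySem.Chars.lower line.toList) [';'] [','])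
    ['{'] ['(']) ['}'] [')']) ['['] ['(']) [']'] [')']) ++ [')']

-- inner `while line[i] == " ": i += 1`
def pvSkipA (s : List Char) (i : Nat) : Nat :=
  if h : i < s.length then
    if s[i] = ' ' then pvSkipA s (i + 1) else i
  else i
termination_by s.length - i

theorem pvSkipA_ge (s : List Char) (i : Nat) : i ≤ pvSkipA s i := by
  unfold pvSkipA
  split
  · split
    · have := pvSkipA_ge s (i + 1); omega
    · exact le_refl i
  · exact le_refl i
termination_by s.length - i

theorem pvSkipA_gt (s : List Char) (i : Nat) (h : i < s.length) (hs : s[i] = ' ') :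
    i < pvSkipA s i := by
  unfold pvSkipA
  rw [dif_pos h, if_pos hs]
  have := pvSkipA_ge s (i + 1); omega

-- outer `while i < len(line)` of A, accumulating `ret`
def pvLoopA (s : List Char) (i : Nat) (ret : List Char) : List Char :=
  if h : i < s.length then
    if hs : s[i] = ' ' then
      -- start = i - 1; skip the run; end = i
      let e := pvSkipA s i
      match PySem.List.pyGet? s (e : Int) with
      | none => ret   -- unreachable from `parsed`: the wrapped line ends in ')', so the inner while stops before the end (Python would raise IndexError here)
      | some endc =>
        let startc := (PySem.List.pyGet? s ((i : Int) - 1)).getD ' '  -- always `some`: -1 ≤ i-1 < len and s ≠ [] (at i = 0 pyGet? wraps like Python's line[-1])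
        let ret' := if startc ∈ ['(', '.', ',', ':'] ∨ endc ∈ ['(', '.', ',', ':'] then ret
                    else ret ++ [' ']
        pvLoopA s e ret'
    else pvLoopA s (i + 1) (ret ++ [s[i]])
  else ret
termination_by s.length - i
decreasing_by
  · have := pvSkipA_gt s i h hs; omega
  · omega

def parsed (line : String) : String := String.ofList (pvLoopA (pvWrap line) 0 [])

-- ===== PORT B =====
-- body of B's single `for c in line` loop
def pvStepB (out : List Char) (c : Char) : List Char :=
  if c = ' ' then
    match out.getLast? with
    | none => out   -- unreachable from `parsed_alt`: '(' is appended before any space arrives (Python's out[-1] would raise IndexError)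
    | some l => if l ≠ ' ' ∧ l ∉ ['(', '.', ',', ':'] then out ++ [' '] else out
  else
    (if c ∈ ['(', '.', ',', ':'] ∧ out.getLast? = some ' ' then out.dropLast else out) ++ [c]

def parsed_alt (line : String) : String := String.ofList ((pvWrap line).foldl pvStepB [])

-- ===== PRECONDITION & SPEC =====
def Spec_parsed (line : String) (out : String) : Prop := out = parsed_alt line
instance (line : String) (out : String) : Decidable (Spec_parsed line out) := by unfold Spec_parsed; infer_instance

-- ===== CLAIM (what is proved, stated in full; the proofs are below) =====
def Claim_equal_parsed : Prop := ∀ (line : String), Dom_parsed line → Spec_parsed line (parsed line)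

-- ===== LEMMAS AND PROOFS =====

-- common characterisation of what both loops emit after position i, given the previous character
def pvSpec (prev : Char) : List Char → List Char
  | [] => []
  | c :: cs =>
    if c = ' ' then
      match hd : cs.dropWhile (· == ' ') with
      | [] => []
      | d :: rest =>
        (if prev ∈ ['(', '.', ',', ':'] ∨ d ∈ ['(', '.', ',', ':'] then [] else [' ']) ++
          d :: pvSpec d rest
    else c :: pvSpec c cs
termination_by l => l.length
decreasing_by
  · have h := List.length_dropWhile_le (p := (· == ' ')) (l := cs)
    rw [hd] at h; simp at h ⊢; omega
  · simp

theorem pvDrop_takeWhile (p : Char → Bool) (l : List Char) :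
    l.drop (l.takeWhile p).length = l.dropWhile p := by
  induction l with
  | nil => rfl
  | cons c cs ih =>
    by_cases h : p c
    · simp [h, ih]
    · simp [h]

theorem pvSkipA_eq (s : List Char) (i : Nat) :
    pvSkipA s i = i + ((s.drop i).takeWhile (· == ' ')).length := by
  unfold pvSkipA
  split
  · rename_i h
    have hdrop : s.drop i = s[i] :: s.drop (i + 1) := List.drop_eq_getElem_cons h
    split
    · rename_i hs
      rw [pvSkipA_eq s (i + 1), hdrop]
      simp [hs]
      omega
    · rename_i hs
      rw [hdrop]
      simp [hs]
  · rename_i h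
    rw [List.drop_eq_nil_of_le (by omega)]
    simp
termination_by s.length - i

theorem pvDropWhile_head (p : Char → Bool) (l : List Char) (d : Char) (rest : List Char)
    (h : l.dropWhile p = d :: rest) : p d = false := by
  induction l with
  | nil => simp at h
  | cons c cs ih =>
    rw [List.dropWhile_cons] at h
    split at h
    · exact ih h
    · rename_i hc; cases h; simpa using hc

theorem pvSpec_nil (p : Char) : pvSpec p [] = [] := by
  rw [pvSpec]

theorem pvSpec_cons_nonspace (p c : Char) (cs : List Char) (h : c ≠ ' ') :
    pvSpec p (c :: cs) = c :: pvSpec c cs := by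
  rw [pvSpec, if_neg h]

theorem pvSpec_cons_space_nil (p : Char) (cs : List Char)
    (h : cs.dropWhile (· == ' ') = []) :
    pvSpec p (' ' :: cs) = [] := by
  rw [pvSpec]
  rw [if_pos rfl]
  split <;> simp_all

theorem pvSpec_cons_space_cons (p : Char) (cs : List Char) (d : Char) (rest : List Char)
    (h : cs.dropWhile (· == ' ') = d :: rest) :
    pvSpec p (' ' :: cs) =
      (if p ∈ ['(', '.', ',', ':'] ∨ d ∈ ['(', '.', ',', ':'] then [] else [' ']) ++
        d :: pvSpec d rest := by
  rw [pvSpec]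
  rw [if_pos rfl]
  split <;> simp_all

-- A's scanner computes pvSpec of the remaining suffix
theorem pvLoopA_spec (s : List Char) (i : Nat) (ret : List Char)
    (h1 : 1 ≤ i)
    (hprev : ∀ h : i < s.length, s[i] = ' ' → s[i - 1]'(by omega) ≠ ' ') :
    pvLoopA s i ret = ret ++ pvSpec (s[i - 1]?.getD ' ') (s.drop i) := by
  rw [pvLoopA]
  by_cases h : i < s.length
  · rw [dif_pos h]
    have hdrop : s.drop i = s[i] :: s.drop (i + 1) := List.drop_eq_getElem_cons h
    by_cases hs : s[i] = ' '
    · rw [dif_pos hs]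
      have htw : ((s.drop i).takeWhile (· == ' ')).length =
          1 + ((s.drop (i + 1)).takeWhile (· == ' ')).length := by
        rw [hdrop]; simp [hs]; omega
      have he : pvSkipA s i = (i + 1) + ((s.drop (i + 1)).takeWhile (· == ' ')).length := by
        rw [pvSkipA_eq, htw]; omega
      have hde : s.drop (pvSkipA s i) = (s.drop (i + 1)).dropWhile (· == ' ') := by
        rw [he, ← pvDrop_takeWhile (· == ' ') (s.drop (i + 1)), ← List.drop_drop]
      have hget : PySem.List.pyGet? s ((pvSkipA s i : Nat) : Int) =
          (s.drop (pvSkipA s i)).head? := by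
        rw [PySem.List.pyGet?_natCast, List.head?_drop]
      have hgetprev : PySem.List.pyGet? s ((i : Int) - 1) = some (s[i - 1]'(by omega)) := by
        have : ((i : Int) - 1) = ((i - 1 : Nat) : Int) := by omega
        rw [this, PySem.List.pyGet?_natCast]
        exact List.getElem?_eq_getElem (by omega)
      cases hdw : (s.drop (i + 1)).dropWhile (· == ' ') with
      | nil =>
        rw [hde, hdw] at hget
        simp only [hget, hde, hdw]
        rw [hdrop, hs, pvSpec_cons_space_nil _ _ hdw, List.append_nil]
        rfl
      | cons d rest =>
        rw [hde, hdw] at hget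
        simp only [hget, hde, hdw, hgetprev, Option.getD_some, List.head?_cons]
        have hd_ne : d ≠ ' ' := by
          have := pvDropWhile_head (· == ' ') (s.drop (i + 1)) d rest hdw
          simpa using this
        have hlen : pvSkipA s i < s.length := by
          by_contra hc
          rw [List.drop_eq_nil_of_le (by omega)] at hde
          rw [hdw] at hde; exact (List.cons_ne_nil d rest) hde.symm
        have hse : s[pvSkipA s i]'hlen = d := by
          have h0 : (s.drop (pvSkipA s i)).head? = s[pvSkipA s i]? := List.head?_drop
          rw [hde, hdw, List.getElem?_eq_getElem hlen] at h0
          simpa using h0.symm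
        rw [pvLoopA_spec s (pvSkipA s i) _ (by omega)
          (by intro hlt hsp; exact absurd hsp (by rw [show s[pvSkipA s i] = d from hse]; exact hd_ne))]
        have hspec_e : pvSpec (s[pvSkipA s i - 1]?.getD ' ') (s.drop (pvSkipA s i)) =
            d :: pvSpec d rest := by
          rw [hde, hdw, pvSpec_cons_nonspace _ _ _ hd_ne]
        rw [hspec_e]
        have hprev1 : s[i - 1]?.getD ' ' = s[i - 1]'(by omega) := by
          rw [List.getElem?_eq_getElem (by omega)]; rfl
        rw [hdrop, hs, pvSpec_cons_space_cons _ _ d rest hdw, hprev1]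
        split_ifs <;> simp
    · rw [dif_neg hs]
      rw [pvLoopA_spec s (i + 1) _ (by omega)
        (by intro hlt hsp; simpa using hs)]
      have : s[(i + 1) - 1]?.getD ' ' = s[i] := by
        simp [List.getElem?_eq_getElem h]
      rw [this, hdrop, pvSpec_cons_nonspace _ _ _ hs]
      simp
  · rw [dif_neg h, List.drop_eq_nil_of_le (by omega), pvSpec_nil, List.append_nil]
termination_by s.length - i
decreasing_by
  all_goals first
    | omega
    | (have := pvSkipA_gt s i h hs; omega)

-- B's fold over a run of spaces does nothing once a space (or a delimiter) has been emitted
theorem pvFoldB_run (run : List Char) (out : List Char) (l : Char)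
    (hl : out.getLast? = some l) (hc : l = ' ' ∨ l ∈ ['(', '.', ',', ':'])
    (hr : ∀ c ∈ run, c = ' ') : run.foldl pvStepB out = out := by
  induction run with
  | nil => rfl
  | cons c cs ih =>
    have hc' : c = ' ' := hr c (by simp)
    have hstep : pvStepB out c = out := by
      rw [pvStepB, if_pos hc', hl]
      show (if l ≠ ' ' ∧ l ∉ ['(', '.', ',', ':'] then out ++ [' '] else out) = out
      rw [if_neg]
      push_neg
      intro h1
      rcases hc with h | h
      · exact absurd h h1
      · exact h
    rw [List.foldl_cons, hstep]
    exact ih (fun x hx => hr x (by simp [hx]))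

theorem pvGetLast_cons (c : Char) (l : List Char) (h : l ≠ []) :
    (c :: l).getLast? = l.getLast? := by
  cases l with
  | nil => simp at h
  | cons a as => simp [List.getLast?_cons_cons]

-- a nonempty list whose elements are all spaces ends in a space
theorem pvAllSpace_getLast (cs : List Char) (h : ∀ c ∈ cs, c = ' ') (hne : cs ≠ []) :
    cs.getLast? = some ' ' := by
  rcases List.getLast?_eq_some_iff.mpr ⟨cs.dropLast, (List.dropLast_concat_getLast hne).symm⟩ with h'
  rw [h']
  exact congrArg some (h _ (List.getLast_mem hne))

-- B's fold computes pvSpec as well (strong induction on the length bound n)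
theorem pvFoldB_spec_aux (n : Nat) : ∀ (cs : List Char), cs.length ≤ n →
    ∀ (out : List Char) (prev : Char),
    out.getLast? = some prev → prev ≠ ' ' → cs.getLast? ≠ some ' ' →
    cs.foldl pvStepB out = out ++ pvSpec prev cs := by
  induction n with
  | zero =>
    intro cs hn out prev hl hp hlast
    have : cs = [] := List.length_eq_zero_iff.mp (by omega)
    subst this
    rw [pvSpec_nil, List.append_nil]; rfl
  | succ n ih =>
  intro cs hn out prev hl hp hlast
  cases cs with
  | nil => rw [pvSpec_nil, List.append_nil]; rfl
  | cons c cs =>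
    by_cases hsp : c = ' '
    · subst hsp
      -- out2 after the first space
      have hstep : pvStepB out ' ' =
          (if prev ∈ ['(', '.', ',', ':'] then out else out ++ [' ']) := by
        rw [pvStepB, if_pos rfl, hl]
        show (if prev ≠ ' ' ∧ prev ∉ ['(', '.', ',', ':'] then out ++ [' '] else out) = _
        by_cases hmem : prev ∈ ['(', '.', ',', ':']
        · rw [if_neg (by simp [hmem]), if_pos hmem]
        · rw [if_pos ⟨hp, hmem⟩, if_neg hmem]
      have hsplit : cs = cs.takeWhile (· == ' ') ++ cs.dropWhile (· == ' ') :=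
        (List.takeWhile_append_dropWhile).symm
      cases hdw : cs.dropWhile (· == ' ') with
      | nil =>
        exfalso
        apply hlast
        apply pvAllSpace_getLast
        · intro x hx
          rcases hx with _ | hx
          · rfl
          · have := List.dropWhile_eq_nil_iff.mp hdw x (by assumption)
            simpa using this
        · simp
      | cons d rest =>
        have hd_ne : d ≠ ' ' := by
          have := pvDropWhile_head (· == ' ') cs d rest hdw
          simpa using this
        set out2 := (if prev ∈ ['(', '.', ',', ':'] then out else out ++ [' ']) with hout2
        have hrun : (cs.takeWhile (· == ' ')).foldl pvStepB out2 = out2 := by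
          apply pvFoldB_run _ _ (if prev ∈ ['(', '.', ',', ':'] then prev else ' ')
          · rw [hout2]
            split_ifs with hm
            · exact hl
            · exact List.getLast?_concat
          · split_ifs with hm
            · exact Or.inr hm
            · exact Or.inl rfl
          · intro x hx
            have hpx : (x == ' ') = true := List.mem_takeWhile_imp (p := (· == ' ')) hx
            simpa using hpx
        -- the step on d
        have hstepd : pvStepB out2 d =
            out ++ (if prev ∈ ['(', '.', ',', ':'] ∨ d ∈ ['(', '.', ',', ':'] then [] else [' ']) ++ [d] := by
          rw [pvStepB, if_neg hd_ne, hout2]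
          by_cases hprevS : prev ∈ ['(', '.', ',', ':']
          · rw [if_pos hprevS, if_pos (Or.inl hprevS)]
            rw [if_neg (by rw [hl]; rintro ⟨-, hcl⟩; exact hp (by simpa using hcl))]
            simp
          · rw [if_neg hprevS]
            by_cases hdS : d ∈ ['(', '.', ',', ':']
            · rw [if_pos ⟨hdS, List.getLast?_concat⟩, if_pos (Or.inr hdS), List.dropLast_concat]
              simp
            · rw [if_neg (by rintro ⟨hdS', -⟩; exact hdS hdS'),
                if_neg (by rintro (h | h); exact hprevS h; exact hdS h)]
        have hout3 : out ++ (if prev ∈ ['(', '.', ',', ':'] ∨ d ∈ ['(', '.', ',', ':'] then [] else [' ']) ++ [d] =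
            (out ++ (if prev ∈ ['(', '.', ',', ':'] ∨ d ∈ ['(', '.', ',', ':'] then [] else [' '])) ++ [d] := by
          simp
        have hlt : rest.length < cs.length + 1 := by
          have h1 := List.length_dropWhile_le (p := (· == ' ')) (l := cs)
          rw [hdw] at h1; simp at h1; omega
        have hrest : rest.foldl pvStepB
            ((out ++ (if prev ∈ ['(', '.', ',', ':'] ∨ d ∈ ['(', '.', ',', ':'] then [] else [' '])) ++ [d]) =
            ((out ++ (if prev ∈ ['(', '.', ',', ':'] ∨ d ∈ ['(', '.', ',', ':'] then [] else [' '])) ++ [d]) ++ pvSpec d rest := by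
          apply ih rest (by simp only [List.length_cons] at hn; omega) _ d (List.getLast?_concat) hd_ne
          cases hr : rest with
          | nil => simp
          | cons r rs =>
            rw [← hr]
            have hsuff : d :: rest <:+ cs := hdw ▸ List.dropWhile_suffix _
            rcases hsuff with ⟨pre, hpre⟩
            have : cs.getLast? = rest.getLast? := by
              rw [← hpre, List.getLast?_append_of_ne_nil _ (by simp),
                pvGetLast_cons d rest (by rw [hr]; simp)]
            rw [← this]
            intro hcontra
            apply hlast
            rw [pvGetLast_cons ' ' cs (by rw [hsplit, hdw]; simp)]
            exact hcontra
        calc (' ' :: cs).foldl pvStepB out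
            = cs.foldl pvStepB (pvStepB out ' ') := by rw [List.foldl_cons]
          _ = (cs.takeWhile (· == ' ') ++ (d :: rest)).foldl pvStepB out2 := by
              rw [hstep, ← hdw, ← hsplit]
          _ = (d :: rest).foldl pvStepB out2 := by rw [List.foldl_append, hrun]
          _ = rest.foldl pvStepB (pvStepB out2 d) := by rw [List.foldl_cons]
          _ = ((out ++ (if prev ∈ ['(', '.', ',', ':'] ∨ d ∈ ['(', '.', ',', ':'] then [] else [' '])) ++ [d]) ++ pvSpec d rest := by
              rw [hstepd, hout3, hrest]
          _ = out ++ pvSpec prev (' ' :: cs) := by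
              rw [pvSpec_cons_space_cons _ _ d rest hdw]
              simp
    · have hstep : pvStepB out c = out ++ [c] := by
        rw [pvStepB, if_neg hsp]
        rw [if_neg (by rw [hl]; simp [hp])]
      rw [List.foldl_cons, hstep, pvSpec_cons_nonspace _ _ _ hsp]
      rw [ih cs (by simp only [List.length_cons] at hn; omega) _ c (List.getLast?_concat) hsp]
      · simp
      · cases hr : cs with
        | nil => simp
        | cons r rs =>
          rw [← hr]
          rw [← pvGetLast_cons c cs (by rw [hr]; simp)]
          exact hlast

theorem pvFoldB_spec (cs : List Char) (out : List Char) (prev : Char)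
    (hl : out.getLast? = some prev) (hp : prev ≠ ' ')
    (hlast : cs.getLast? ≠ some ' ') :
    cs.foldl pvStepB out = out ++ pvSpec prev cs :=
  pvFoldB_spec_aux cs.length cs (le_refl _) out prev hl hp hlast

-- the wrapped list starts with '(' and ends with ')'
theorem pvWrap_eq (line : String) :
    ∃ mid, pvWrap line = '(' :: (mid ++ [')']) := by
  exact ⟨_, rfl⟩

-- ===== VERDICT (by name: the statement is the Claim_ definition above) =====
theorem parsed_spec : Claim_equal_parsed := by
  unfold Claim_equal_parsed
  intro line _
  unfold Spec_parsed parsed parsed_alt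
  rcases pvWrap_eq line with ⟨mid, hw⟩
  rw [hw]
  congr 1
  -- A side: first step eats the '('
  have hA : pvLoopA ('(' :: (mid ++ [')'])) 0 [] = pvLoopA ('(' :: (mid ++ [')'])) 1 ['('] := by
    rw [pvLoopA]
    rw [dif_pos (by simp)]
    rw [dif_neg (by simp)]
    rfl
  have hA2 : pvLoopA ('(' :: (mid ++ [')'])) 1 ['('] =
      ['('] ++ pvSpec '(' (mid ++ [')']) := by
    have := pvLoopA_spec ('(' :: (mid ++ [')'])) 1 ['('] (le_refl 1)
      (by intro hlt hsp; simp)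
    simpa using this
  -- B side
  have hB : ('(' :: (mid ++ [')'])).foldl pvStepB [] =
      ['('] ++ pvSpec '(' (mid ++ [')']) := by
    rw [List.foldl_cons]
    have hstep0 : pvStepB [] '(' = ['('] := by rw [pvStepB]; simp
    rw [hstep0]
    exact pvFoldB_spec (mid ++ [')']) ['('] '(' (by simp) (by simp)
      (by rw [List.getLast?_concat]; simp)
  rw [hA, hA2, hB]
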